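-- pv_equiv track=rewrite | github.com/Shivam-baghel/Python_Scaler | 2. Data Structures and Algorithm/1. Intermediate/05.1 Arrays - Interview Problems/Assignment/Q2. Counting Triplets.py | triplets
-- ===== SOURCE A (Python) =====
-- def triplets(A: list):
--     arr = A
--     n = len(A)
--     result = 0
--     for i in range(n):
--         left = 0
--         right = 0
--         for j in range(i):
--             if arr[j] < arr[i]:
--                 left += 1
--         for j in range(i + 1, n):
--             if arr[j] > arr[i]:
--                 right += 1
--         result += (left * right)
--
--     return result
-- ===== SOURCE B (Python) =====
-- def _bisect_left(s, x):
--     lo, hi = 0, len(s)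
--     while lo < hi:
--         mid = (lo + hi) // 2
--         if s[mid] < x:
--             lo = mid + 1
--         else:
--             hi = mid
--     return lo
--
--
-- def _bisect_right(s, x):
--     lo, hi = 0, len(s)
--     while lo < hi:
--         mid = (lo + hi) // 2
--         if x < s[mid]:
--             hi = mid
--         else:
--             lo = mid + 1
--     return lo
--
--
-- def triplets(A: list):
--     # backward pass: for each position (scanned right-to-left) count the
--     # strictly greater elements to its right using a sorted list + binary search
--     rights = []
--     seen = []
--     for x in reversed(A):
--         pos = _bisect_right(seen, x)
--         rights.append(len(seen) - pos)
--         seen.insert(pos, x)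
--     rights.reverse()
--     # forward pass: smaller-to-the-left count via binary search, accumulate products
--     result = 0
--     seen = []
--     for x, r in zip(A, rights):
--         pos = _bisect_left(seen, x)
--         result += pos * r
--         seen.insert(pos, x)
--     return result
-- ===== Notes on version B (the rewrite author's own statement) =====
-- stated objective: faster
-- what changed: Replaces A's per-index nested linear scans with two sweeps that maintain a sorted list of the elements seen so far and obtain each smaller-left / larger-right count by binary search (hand-written bisect), inserting each element at its sorted position.
import Mathlib
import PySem

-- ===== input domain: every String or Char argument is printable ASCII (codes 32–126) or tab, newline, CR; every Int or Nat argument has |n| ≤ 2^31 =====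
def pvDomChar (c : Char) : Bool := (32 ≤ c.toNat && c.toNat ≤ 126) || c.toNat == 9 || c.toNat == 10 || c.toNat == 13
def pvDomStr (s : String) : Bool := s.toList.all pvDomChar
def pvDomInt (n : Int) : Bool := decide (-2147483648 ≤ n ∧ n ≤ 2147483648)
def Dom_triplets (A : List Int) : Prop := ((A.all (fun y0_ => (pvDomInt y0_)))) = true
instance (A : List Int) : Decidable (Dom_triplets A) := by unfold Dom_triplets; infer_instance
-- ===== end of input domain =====

-- B replaces A's per-index nested linear scans by two sweeps that keep a sorted list and
-- binary-search it (hand-written bisect); a timing run measured B faster.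

-- ===== PORT A =====
def triplets (A : List Int) : Int :=
  let arr := A
  let n : Int := A.length
  (PySem.List.pyRange 0 n).foldl (fun result i =>
    let left : Int := (PySem.List.pyRange 0 i).foldl
      (fun acc j => if PySem.List.pyGetD arr j 0 < PySem.List.pyGetD arr i 0 then acc + 1 else acc) 0
    let right : Int := (PySem.List.pyRange (i + 1) n).foldl
      (fun acc j => if PySem.List.pyGetD arr j 0 > PySem.List.pyGetD arr i 0 then acc + 1 else acc) 0
    result + left * right) 0

-- ===== PORT B =====
-- _bisect_left / _bisect_right in Source B are verbatim the stdlib bisect algorithm;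
-- they are ported as PySem.List.bisectLeft / bisectRight (the transcription of that loop).
def tripletsBackStep (st : List Int × List Int) (x : Int) : List Int × List Int :=
  let pos := PySem.List.bisectRight st.2 x
  (st.1 ++ [(st.2.length : Int) - (pos : Int)], PySem.List.insert st.2 (pos : Int) x)

def tripletsFwdStep (st : Int × List Int) (xr : Int × Int) : Int × List Int :=
  let pos := PySem.List.bisectLeft st.2 xr.1
  (st.1 + (pos : Int) * xr.2, PySem.List.insert st.2 (pos : Int) xr.1)

def triplets_alt (A : List Int) : Int :=
  let bp := A.reverse.foldl tripletsBackStep ([], [])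
  let rights := bp.1.reverse
  ((A.zip rights).foldl tripletsFwdStep (0, [])).1

-- ===== PRECONDITION & SPEC =====
def Spec_triplets (A : List Int) (out : Int) : Prop := out = triplets_alt A
instance (A : List Int) (out : Int) : Decidable (Spec_triplets A out) := by unfold Spec_triplets; infer_instance

-- ===== CLAIM (what is proved, stated in full; the proofs are below) =====
def Claim_equal_triplets : Prop := ∀ (A : List Int), Dom_triplets A → Spec_triplets A (triplets A)

-- ===== LEMMAS AND PROOFS =====

-- the common value both ports compute: Σ_i (#smaller on the left of i) · (#larger on the right of i)
def gval (A : List Int) : Int :=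
  ((List.range A.length).map (fun k =>
    (((A.take k).countP (fun y => decide (y < A.getD k 0)) : Nat) : Int) *
    (((A.drop (k+1)).countP (fun y => decide (A.getD k 0 < y)) : Nat) : Int))).sum

lemma countP_eq_pos (p : Int → Bool) (s : List Int) (pos : Nat) (hpos : pos ≤ s.length)
    (h1 : ∀ (j : Nat) (hj : j < s.length), j < pos → p s[j])
    (h2 : ∀ (j : Nat) (hj : j < s.length), pos ≤ j → ¬ p s[j]) :
    s.countP p = pos := by
  have hsplit : s = s.take pos ++ s.drop pos := (List.take_append_drop pos s).symm
  have hlen : (s.take pos).length = pos := by simp [hpos]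
  have h1' : (s.take pos).countP p = pos := by
    rw [List.countP_eq_length.2]
    · exact hlen
    · intro a ha
      obtain ⟨j, hj, rfl⟩ := List.getElem_of_mem ha
      simp only [List.length_take] at hj
      have hj' : j < pos := by omega
      have hjs : j < s.length := by omega
      rw [List.getElem_take]
      exact h1 j hjs hj'
  have h2' : (s.drop pos).countP p = 0 := by
    rw [List.countP_eq_zero.2]
    intro a ha
    obtain ⟨j, hj, rfl⟩ := List.getElem_of_mem ha
    have hjs : pos + j < s.length := by
      have := List.length_drop (l := s) (i := pos); omega
    rw [List.getElem_drop]
    exact h2 (pos + j) hjs (by omega)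
  conv_lhs => rw [hsplit]
  rw [List.countP_append, h1', h2']
  omega

lemma bisectL_countP (s : List Int) (x : Int) (hs : s.Pairwise (· ≤ ·)) :
    s.countP (fun y => decide (y < x)) = PySem.List.bisectLeft s x := by
  obtain ⟨hle, h1, h2⟩ := PySem.List.bisectLeft_spec s x hs
  exact countP_eq_pos _ s _ hle
    (fun j hj hlt => by simpa using h1 j hj hlt)
    (fun j hj hge => by simpa using h2 j hj hge)

lemma bisectR_countP (s : List Int) (x : Int) (hs : s.Pairwise (· ≤ ·)) :
    s.countP (fun y => decide (y ≤ x)) = PySem.List.bisectRight s x := by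
  obtain ⟨hle, h1, h2⟩ := PySem.List.bisectRight_spec s x hs
  exact countP_eq_pos _ s _ hle
    (fun j hj hlt => by simpa using h1 j hj hlt)
    (fun j hj hge => by simpa using h2 j hj hge)

lemma countP_gt_eq (s : List Int) (x : Int) (hs : s.Pairwise (· ≤ ·)) :
    s.countP (fun y => decide (x < y)) = s.length - PySem.List.bisectRight s x := by
  have h := List.length_eq_countP_add_countP (l := s) (p := fun y => decide (y ≤ x))
  have hc : s.countP (fun a => decide ¬(fun y => decide (y ≤ x)) a = true) =
      s.countP (fun y => decide (x < y)) := by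
    apply List.countP_congr
    intro a _
    simp [not_le]
  rw [hc, bisectR_countP s x hs] at h
  omega

lemma insert_pairwise (s : List Int) (x : Int) (pos : Nat) (hpos : pos ≤ s.length)
    (hs : s.Pairwise (· ≤ ·))
    (h1 : ∀ (j : Nat) (hj : j < s.length), j < pos → s[j] ≤ x)
    (h2 : ∀ (j : Nat) (hj : j < s.length), pos ≤ j → x ≤ s[j]) :
    (s.take pos ++ x :: s.drop pos).Pairwise (· ≤ ·) := by
  have htake : ∀ a ∈ s.take pos, a ≤ x := by
    intro a ha
    obtain ⟨j, hj, rfl⟩ := List.getElem_of_mem ha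
    simp only [List.length_take] at hj
    have hjs : j < s.length := by omega
    rw [List.getElem_take]
    exact h1 j hjs (by omega)
  have hdrop : ∀ b ∈ s.drop pos, x ≤ b := by
    intro b hb
    obtain ⟨j, hj, rfl⟩ := List.getElem_of_mem hb
    have hjs : pos + j < s.length := by have := List.length_drop (l := s) (i := pos); omega
    rw [List.getElem_drop]
    exact h2 (pos + j) hjs (by omega)
  rw [List.pairwise_append]
  refine ⟨hs.sublist (List.take_sublist _ _), ?_, ?_⟩
  · constructor
    · intro b hb; exact hdrop b hb
    · exact hs.sublist (List.drop_sublist _ _)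
  · intro a ha b hb
    rcases List.mem_cons.1 hb with rfl | hb
    · exact htake a ha
    · exact le_trans (htake a ha) (hdrop b hb)

lemma insert_perm (s : List Int) (x : Int) (pos : Nat) :
    (s.take pos ++ x :: s.drop pos).Perm (x :: s) := by
  have h := List.perm_middle (a := x) (l₁ := s.take pos) (l₂ := s.drop pos)
  simpa [List.take_append_drop] using h

lemma take_eq_map_range (A : List Int) (k : Nat) (hk : k ≤ A.length) :
    A.take k = (List.range k).map (fun j => A.getD j 0) := by
  apply List.ext_getElem
  · simp [hk]
  · intro i h1' h2'
    have hik : i < k := by simpa using h2'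
    have hia : i < A.length := by omega
    simp [List.getElem_take, List.getD_eq_getElem?_getD, List.getElem?_eq_getElem hia]

lemma bpass_spec (l : List Int) :
    (l.foldl tripletsBackStep ([], [])).2.Perm l ∧
    (l.foldl tripletsBackStep ([], [])).2.Pairwise (· ≤ ·) ∧
    (l.foldl tripletsBackStep ([], [])).1 =
      (List.range l.length).map (fun k =>
        (((l.take k).countP (fun y => decide (l.getD k 0 < y)) : Nat) : Int)) := by
  induction l using List.reverseRecOn with
  | nil => simp
  | append_singleton l x ih =>
    obtain ⟨hperm, hsort, hfst⟩ := ih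
    set st := l.foldl tripletsBackStep ([], []) with hst
    obtain ⟨hle, hb1, hb2⟩ := PySem.List.bisectRight_spec st.2 x hsort
    have hfold : (l ++ [x]).foldl tripletsBackStep ([], []) = tripletsBackStep st x := by
      rw [List.foldl_append]; rfl
    rw [hfold]
    set pos := PySem.List.bisectRight st.2 x with hposdef
    have hins : PySem.List.insert st.2 (pos : Int) x = st.2.take pos ++ x :: st.2.drop pos :=
      PySem.List.insert_natCast _ _ _ hle
    have h2 : (tripletsBackStep st x).2 = st.2.take pos ++ x :: st.2.drop pos := by
      rw [show (tripletsBackStep st x).2 = PySem.List.insert st.2 (pos : Int) x from rfl, hins]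
    refine ⟨?_, ?_, ?_⟩
    · rw [h2]
      exact ((insert_perm _ _ _).trans (hperm.cons x)).trans (List.perm_append_singleton x l).symm
    · rw [h2]
      exact insert_pairwise _ _ _ hle hsort hb1 (fun j hj h => le_of_lt (hb2 j hj h))
    · have h1 : (tripletsBackStep st x).1 = st.1 ++ [(st.2.length : Int) - (pos : Int)] := rfl
      rw [h1, hfst]
      have hlenl : st.2.length = l.length := hperm.length_eq
      have hval : (st.2.length : Int) - (pos : Int) =
          ((l.countP (fun y => decide (x < y)) : Nat) : Int) := by
        rw [← hperm.countP_eq (fun y => decide (x < y)), countP_gt_eq st.2 x hsort,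
          ← hposdef, Nat.cast_sub hle]
      rw [hval]
      have hlen : (l ++ [x]).length = l.length + 1 := by simp
      rw [hlen, List.range_succ, List.map_append]
      congr 1
      · apply List.map_congr_left
        intro k hk
        have hk' : k < l.length := List.mem_range.1 hk
        rw [List.take_append_of_le_length (le_of_lt hk'), List.getD_append _ _ _ _ hk']
      · simp only [List.map_cons, List.map_nil]
        have hget : (l ++ [x]).getD l.length 0 = x := by
          rw [List.getD_eq_getElem?_getD, List.getElem?_append_right (le_refl _)]
          simp
        have htk : (l ++ [x]).take l.length = l := List.take_left
        rw [hget, htk]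

lemma rights_eq (A : List Int) :
    ((A.reverse.foldl tripletsBackStep ([], [])).1).reverse =
      (List.range A.length).map (fun k =>
        (((A.drop (k+1)).countP (fun y => decide (A.getD k 0 < y)) : Nat) : Int)) := by
  obtain ⟨-, -, hfst⟩ := bpass_spec A.reverse
  rw [hfst]
  apply List.ext_getElem
  · simp
  · intro i h1 h2
    simp only [List.length_map, List.length_range] at h2
    have hi : i < A.length := h2
    rw [List.getElem_reverse, List.getElem_map, List.getElem_map, List.getElem_range,
      List.getElem_range]
    simp only [List.length_map, List.length_range, List.length_reverse]
    have e1 : A.reverse.getD (A.length - 1 - i) 0 = A.getD i 0 := by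
      have hidx : A.length - 1 - (A.length - 1 - i) = i := by omega
      rw [List.getD_eq_getElem?_getD, List.getD_eq_getElem?_getD,
        List.getElem?_eq_getElem (by rw [List.length_reverse]; omega : A.length - 1 - i < A.reverse.length),
        List.getElem?_eq_getElem hi, List.getElem_reverse]
      simp [hidx]
    have e2 : A.reverse.take (A.length - 1 - i) = (A.drop (i + 1)).reverse := by
      rw [List.take_reverse]
      have : A.length - (A.length - 1 - i) = i + 1 := by omega
      rw [this]
    rw [e1, e2, List.countP_reverse]

def fsum : List (Int × Int) → List Int → Int
  | [], _ => 0
  | (x, r) :: ps, pre => ((pre.countP (fun y => decide (y < x)) : Nat) : Int) * r + fsum ps (pre ++ [x])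

lemma fpass_spec (ps : List (Int × Int)) : ∀ (acc : Int) (seen pre : List Int),
    seen.Perm pre → seen.Pairwise (· ≤ ·) →
    (ps.foldl tripletsFwdStep (acc, seen)).1 = acc + fsum ps pre := by
  induction ps with
  | nil => intro acc seen pre _ _; simp [fsum]
  | cons xr ps ih =>
    intro acc seen pre hperm hsort
    obtain ⟨x, r⟩ := xr
    obtain ⟨hle, hb1, hb2⟩ := PySem.List.bisectLeft_spec seen x hsort
    set pos := PySem.List.bisectLeft seen x with hposdef
    have hins : PySem.List.insert seen (pos : Int) x = seen.take pos ++ x :: seen.drop pos :=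
      PySem.List.insert_natCast _ _ _ hle
    have hstep : List.foldl tripletsFwdStep (acc, seen) ((x, r) :: ps) =
        List.foldl tripletsFwdStep (acc + (pos : Int) * r, PySem.List.insert seen (pos : Int) x) ps := rfl
    rw [hstep]
    have hsort' : (PySem.List.insert seen (pos : Int) x).Pairwise (· ≤ ·) := by
      rw [hins]
      exact insert_pairwise _ _ _ hle hsort (fun j hj h => le_of_lt (hb1 j hj h)) hb2
    have hperm' : (PySem.List.insert seen (pos : Int) x).Perm (pre ++ [x]) := by
      rw [hins]
      exact ((insert_perm _ _ _).trans (hperm.cons x)).trans (List.perm_append_singleton x pre).symm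
    rw [ih _ _ _ hperm' hsort']
    have hcnt : (pos : Int) = ((pre.countP (fun y => decide (y < x)) : Nat) : Int) := by
      rw [← hperm.countP_eq, bisectL_countP seen x hsort]
    rw [hcnt]
    show _ = acc + fsum ((x, r) :: ps) pre
    simp only [fsum]
    ring

lemma fsum_formula (l : List Int) : ∀ (r : List Int) (pre : List Int), r.length = l.length →
    fsum (l.zip r) pre =
      ((List.range l.length).map (fun k =>
        ((((pre ++ l.take k).countP (fun y => decide (y < l.getD k 0)) : Nat) : Int)) * r.getD k 0)).sum := by
  induction l with
  | nil => intro r pre _; simp [fsum]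
  | cons x l' ih =>
    intro r pre hlen
    cases r with
    | nil => simp at hlen
    | cons b r' =>
      simp only [List.zip_cons_cons, fsum]
      rw [ih r' (pre ++ [x]) (by simpa using hlen)]
      simp only [List.length_cons, List.range_succ_eq_map, List.map_cons, List.sum_cons,
        List.map_map]
      congr 1
      · simp
      · congr 1
        apply List.map_congr_left
        intro k hk
        simp [Function.comp, List.take_succ_cons, List.append_assoc]

lemma B_eq (A : List Int) : triplets_alt A = gval A := by
  show ((A.zip ((A.reverse.foldl tripletsBackStep ([], [])).1).reverse).foldl
      tripletsFwdStep (0, [])).1 = gval A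
  rw [rights_eq, fpass_spec _ 0 [] [] (List.Perm.refl _) List.Pairwise.nil,
    fsum_formula _ _ [] (by simp)]
  rw [zero_add]
  unfold gval
  refine congrArg List.sum (List.map_congr_left ?_)
  intro k hk
  have hk' : k < A.length := List.mem_range.1 hk
  rw [List.nil_append, PySem.List.getD_map_range _ _ _ _ hk']

lemma A_eq (A : List Int) : triplets A = gval A := by
  show (PySem.List.pyRange 0 (A.length : Int)).foldl (fun result i =>
      result +
        ((PySem.List.pyRange 0 i).foldl
          (fun acc j => if PySem.List.pyGetD A j 0 < PySem.List.pyGetD A i 0 then acc + 1 else acc) 0) *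
        ((PySem.List.pyRange (i + 1) (A.length : Int)).foldl
          (fun acc j => if PySem.List.pyGetD A j 0 > PySem.List.pyGetD A i 0 then acc + 1 else acc) 0)) 0
    = gval A
  rw [PySem.List.pyRange_zero_natCast A.length, List.foldl_map, PySem.List.foldl_add, zero_add]
  unfold gval
  refine congrArg List.sum (List.map_congr_left ?_)
  intro k hk
  have hk' : k < A.length := List.mem_range.1 hk
  -- left count
  have hL : (PySem.List.pyRange 0 ((k : Nat) : Int)).foldl
      (fun acc j => if PySem.List.pyGetD A j 0 < PySem.List.pyGetD A ((k : Nat) : Int) 0 then acc + 1 else acc) 0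
      = (((A.take k).countP (fun y => decide (y < A.getD k 0)) : Nat) : Int) := by
    rw [PySem.List.pyRange_zero_natCast k, List.foldl_map]
    simp only [PySem.List.pyGetD_natCast]
    rw [PySem.List.foldl_ite_add_one (fun j => A.getD j 0 < A.getD k 0) (List.range k) 0, zero_add]
    rw [take_eq_map_range A k (le_of_lt hk'), List.countP_map]
    rfl
  -- right count
  have hcast : ((k : Int) + 1).toNat = k + 1 := by omega
  have hRv : (PySem.List.pyRange (((k : Nat) : Int) + 1) ((A.length : Nat) : Int)).foldl
      (fun acc j => if PySem.List.pyGetD A j 0 > PySem.List.pyGetD A ((k : Nat) : Int) 0 then acc + 1 else acc) 0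
      = (((A.drop (k+1)).countP (fun y => decide (A.getD k 0 < y)) : Nat) : Int) := by
    rw [PySem.List.foldl_pyRange_pyGetD' A 0
      (fun acc y => if y > PySem.List.pyGetD A ((k : Nat) : Int) 0 then acc + 1 else acc) 0
      (by positivity : (0:Int) ≤ ((k : Nat) : Int) + 1)]
    rw [hcast, PySem.List.foldl_ite_add_one _ _ 0, zero_add]
    simp only [PySem.List.pyGetD_natCast, gt_iff_lt]
  rw [hL, hRv]

-- ===== VERDICT (by name: the statement is the Claim_ definition above) =====
theorem triplets_spec : Claim_equal_triplets := by
  intro A _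
  unfold Spec_triplets
  rw [A_eq, B_eq]
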